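-- pv_equiv track=rewrite | github.com/ttoino/feup-fpro | RE11/days_until_empty.py | days_until_empty
-- ===== SOURCE A (Python) =====
-- def days_until_empty(c, l):
--     i = -1
--     water = c
--
--     while water > 0:
--         i += 1
--         water = min(water + l, c)
--         water -= i
--
--     return i
-- ===== SOURCE B (Python) =====
-- def _isqrt(t):
--     # binary-search integer square root, t >= 0
--     lo, hi = 0, t + 1
--     while hi - lo > 1:
--         mid = (lo + hi) // 2
--         if mid * mid <= t:
--             lo = mid
--         else:
--             hi = mid
--     return lo
--
--
-- def _drain_days(m, w):
--     # smallest j >= 0 with w + j*m - j*(j+1)//2 <= 0, for m <= -1 and w > 0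
--     d = 1 - 2 * m
--     t = d * d + 8 * w
--     s = _isqrt(t)
--     return (s - d + 1) // 2 if s * s == t else (s - d + 2) // 2
--
--
-- def days_until_empty(c, l):
--     # Closed form: the reservoir stays clamped at capacity while the daily draw
--     # i is at most l, then drains as an arithmetic progression; solve that
--     # quadratic with an integer square root.
--     if c <= 0:
--         return -1
--     if l >= 0:
--         if c <= l + 1:
--             return c
--         i0, w = l + 1, c - l - 1
--     else:
--         i0, w = 0, c + l
--     if w <= 0:
--         return i0
--     return i0 + _drain_days(l - i0, w)
-- ===== Notes on version B (the rewrite author's own statement) =====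
-- stated objective: faster
-- what changed: B replaces A's day-by-day while-loop simulation with a closed form: the clamped refill phase is solved directly and the arithmetic-progression drain phase is solved with an integer square root (binary-search isqrt).
import Mathlib
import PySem

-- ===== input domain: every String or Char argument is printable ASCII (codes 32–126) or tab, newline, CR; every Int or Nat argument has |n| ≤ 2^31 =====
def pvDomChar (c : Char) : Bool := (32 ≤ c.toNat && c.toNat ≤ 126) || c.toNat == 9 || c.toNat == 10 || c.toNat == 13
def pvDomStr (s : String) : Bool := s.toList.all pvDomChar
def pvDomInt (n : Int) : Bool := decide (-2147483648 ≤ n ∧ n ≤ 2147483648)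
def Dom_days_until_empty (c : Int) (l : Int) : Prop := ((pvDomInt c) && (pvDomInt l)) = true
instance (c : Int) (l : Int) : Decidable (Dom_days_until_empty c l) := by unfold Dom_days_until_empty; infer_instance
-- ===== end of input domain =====

-- B replaces A's day-by-day simulation with an O(log c) closed form (isqrt of the quadratic drain);
-- a timing run measured B faster on large inputs.

-- ===== PORT A =====
-- the while loop of A; i, water are the loop state
def loopA (c l i water : Int) : Int :=
  if 0 < water then loopA c l (i + 1) (min (water + l) c - (i + 1)) else i
termination_by (c - i).toNat + (if water ≤ c - i then 0 else 1)
decreasing_by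
  rename_i h
  have h1 : min (water + l) c ≤ c := min_le_right _ _
  split_ifs <;> omega

def days_until_empty (c : Int) (l : Int) : Int :=
  loopA c l (-1) c

-- ===== PORT B =====
-- binary-search integer square root (Source B's _isqrt)
def isqrtLoop (t lo hi : Int) : Int :=
  if 1 < hi - lo then
    let mid := PySem.Int.floordiv (lo + hi) 2
    if mid * mid ≤ t then isqrtLoop t mid hi else isqrtLoop t lo mid
  else lo
termination_by (hi - lo).toNat
decreasing_by
  all_goals
    have hb := PySem.Int.floordiv_mul_add_mod (lo + hi) 2
    have hm0 : 0 ≤ PySem.Int.mod (lo + hi) 2 := by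
      have := PySem.Int.mod_eq_emod_of_pos (a := lo + hi) (b := 2) (by omega)
      omega
    have hm1 : PySem.Int.mod (lo + hi) 2 < 2 := by
      have := PySem.Int.mod_eq_emod_of_pos (a := lo + hi) (b := 2) (by omega)
      omega
    omega

def isqrt (t : Int) : Int := isqrtLoop t 0 (t + 1)

-- Source B's _drain_days: smallest j >= 0 with w + j*m - j*(j+1)/2 <= 0, for m <= -1, w > 0
def drainDays (m w : Int) : Int :=
  let d := 1 - 2 * m
  let t := d * d + 8 * w
  let s := isqrt t
  if s * s = t then PySem.Int.floordiv (s - d + 1) 2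
  else PySem.Int.floordiv (s - d + 2) 2

-- Source B's tail after (i0, w) are fixed
def solveTail (l i0 w : Int) : Int :=
  if w ≤ 0 then i0 else i0 + drainDays (l - i0) w

def days_until_empty_alt (c : Int) (l : Int) : Int :=
  if c ≤ 0 then -1
  else if 0 ≤ l then
    if c ≤ l + 1 then c else solveTail l (l + 1) (c - l - 1)
  else solveTail l 0 (c + l)

-- ===== PRECONDITION & SPEC =====
def Spec_days_until_empty (c : Int) (l : Int) (out : Int) : Prop := out = days_until_empty_alt c l
instance (c : Int) (l : Int) (out : Int) : Decidable (Spec_days_until_empty c l out) := by unfold Spec_days_until_empty; infer_instance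

-- ===== CLAIM (what is proved, stated in full; the proofs are below) =====
def Claim_equal_days_until_empty : Prop := ∀ (c : Int) (l : Int), Dom_days_until_empty c l → Spec_days_until_empty c l (days_until_empty c l)

-- ===== LEMMAS AND PROOFS =====

-- doubled water level after j further days from state (i, water), assuming the min never clamps
def G (l i water j : Int) : Int := 2 * water + 2 * j * (l - i) - j * (j + 1)

lemma G_shift (l i water j : Int) :
    G l (i + 1) (water + l - (i + 1)) j = G l i water (j + 1) := by
  unfold G; ring

-- characterization of A's loop in the unclamped phase:
-- if J is the least j ≥ 0 with G ≤ 0, the loop returns i + J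
lemma loopA_char (c l : Int) : ∀ (n : ℕ) (i water J : Int),
    (c - i).toNat ≤ n → water ≤ c - i → l ≤ i → water + l ≤ c →
    0 ≤ J → G l i water J ≤ 0 → (∀ j, 0 ≤ j → j < J → 0 < G l i water j) →
    loopA c l i water = i + J := by
  intro n
  induction n with
  | zero =>
    intro i water J hn hw hl hwl hJ0 hJ hmin
    have hw0 : ¬ 0 < water := by omega
    have hJz : J = 0 := by
      by_contra hne
      have := hmin 0 (by omega) (by omega)
      simp [G] at this
      omega
    rw [loopA, if_neg hw0]
    omega
  | succ n ih =>
    intro i water J hn hw hl hwl hJ0 hJ hmin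
    by_cases hw0 : 0 < water
    · -- loop takes a step
      have hJpos : 0 < J := by
        by_contra hne
        have : J = 0 := by omega
        subst this
        simp [G] at hJ
        omega
      have hmin' : min (water + l) c = water + l := min_eq_left hwl
      rw [loopA, if_pos hw0, hmin']
      have := ih (i + 1) (water + l - (i + 1)) (J - 1)
        (by omega) (by omega) (by omega) (by omega) (by omega)
        (by rw [G_shift]; simpa using hJ)
        (by
          intro j hj0 hjlt
          rw [G_shift]
          exact hmin (j + 1) (by omega) (by omega))
      omega
    · have hJz : J = 0 := by
        by_contra hne
        have := hmin 0 (by omega) (by omega)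
        simp [G] at this
        omega
      rw [loopA, if_neg hw0]
      omega

lemma isqrtLoop_spec (t : Int) : ∀ (n : ℕ) (lo hi : Int),
    (hi - lo).toNat ≤ n → 0 ≤ lo → lo < hi → lo * lo ≤ t → t < hi * hi →
    0 ≤ isqrtLoop t lo hi ∧ isqrtLoop t lo hi * isqrtLoop t lo hi ≤ t ∧
      t < (isqrtLoop t lo hi + 1) * (isqrtLoop t lo hi + 1) := by
  intro n
  induction n with
  | zero => intro lo hi hn h0 hlh _ _; omega
  | succ n ih =>
    intro lo hi hn h0 hlh hlo hhi
    rw [isqrtLoop]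
    by_cases hgap : 1 < hi - lo
    · rw [if_pos hgap]
      have hb := PySem.Int.floordiv_mul_add_mod (lo + hi) 2
      have hm := PySem.Int.mod_eq_emod_of_pos (a := lo + hi) (b := 2) (by omega)
      have hmid1 : lo < PySem.Int.floordiv (lo + hi) 2 := by omega
      have hmid2 : PySem.Int.floordiv (lo + hi) 2 < hi := by omega
      by_cases hsq : PySem.Int.floordiv (lo + hi) 2 * PySem.Int.floordiv (lo + hi) 2 ≤ t
      · simp only [if_pos hsq]
        exact ih _ _ (by omega) (by omega) hmid2 hsq hhi
      · simp only [if_neg hsq]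
        exact ih _ _ (by omega) h0 hmid1 hlo (by omega)
    · rw [if_neg hgap]
      have : hi = lo + 1 := by omega
      subst this
      exact ⟨h0, hlo, hhi⟩

lemma isqrt_spec (t : Int) (ht : 0 ≤ t) :
    0 ≤ isqrt t ∧ isqrt t * isqrt t ≤ t ∧ t < (isqrt t + 1) * (isqrt t + 1) := by
  unfold isqrt
  exact isqrtLoop_spec t (t + 1).toNat 0 (t + 1) (by omega) (by omega) (by omega)
    (by omega) (by nlinarith)

-- key algebraic identity and minimality of the computed j, with the isqrt value abstracted
lemma drain_min_aux (m w s jj : Int) (hm : m ≤ -1) (hw : 0 < w) (hs0 : 0 ≤ s)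
    (hs1 : s * s ≤ (1 - 2 * m) * (1 - 2 * m) + 8 * w)
    (hs2 : (1 - 2 * m) * (1 - 2 * m) + 8 * w < (s + 1) * (s + 1))
    (hjj : jj = if s * s = (1 - 2 * m) * (1 - 2 * m) + 8 * w
      then PySem.Int.floordiv (s - (1 - 2 * m) + 1) 2
      else PySem.Int.floordiv (s - (1 - 2 * m) + 2) 2) :
    0 ≤ jj ∧ 2 * w + 2 * jj * m - jj * (jj + 1) ≤ 0 ∧
      ∀ j, 0 ≤ j → j < jj → 0 < 2 * w + 2 * j * m - j * (j + 1) := by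
  have hd3 : 3 ≤ 1 - 2 * m := by omega
  have hkey : ∀ x : Int, (2 * x + (1 - 2 * m)) * (2 * x + (1 - 2 * m))
      - ((1 - 2 * m) * (1 - 2 * m) + 8 * w) = -4 * (2 * w + 2 * x * m - x * (x + 1)) := by
    intro x; ring
  have htd : (1 - 2 * m) * (1 - 2 * m) < (1 - 2 * m) * (1 - 2 * m) + 8 * w := by omega
  by_cases hsq : s * s = (1 - 2 * m) * (1 - 2 * m) + 8 * w
  · rw [if_pos hsq] at hjj
    have hbnd := (PySem.Int.floordiv_eq_iff_of_pos (show (0:Int) < 2 by norm_num)).mp hjj.symm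
    have hj1 : s ≤ 2 * jj + (1 - 2 * m) := by omega
    have hsd : 1 - 2 * m < s := by nlinarith
    refine ⟨by omega, ?_, ?_⟩
    · have := hkey jj
      have h2 : s * s ≤ (2 * jj + (1 - 2 * m)) * (2 * jj + (1 - 2 * m)) := by nlinarith
      omega
    · intro j hj0 hjlt
      have := hkey j
      have hle : 2 * j + (1 - 2 * m) ≤ s - 1 := by omega
      have h2 : (2 * j + (1 - 2 * m)) * (2 * j + (1 - 2 * m)) < s * s := by nlinarith
      omega
  · rw [if_neg hsq] at hjj
    have hbnd := (PySem.Int.floordiv_eq_iff_of_pos (show (0:Int) < 2 by norm_num)).mp hjj.symm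
    have hj1 : s + 1 ≤ 2 * jj + (1 - 2 * m) := by omega
    have hsd : 1 - 2 * m ≤ s + 1 := by nlinarith
    refine ⟨by omega, ?_, ?_⟩
    · have := hkey jj
      have h2 : (s + 1) * (s + 1) ≤ (2 * jj + (1 - 2 * m)) * (2 * jj + (1 - 2 * m)) := by
        nlinarith
      omega
    · intro j hj0 hjlt
      have := hkey j
      have hle : 2 * j + (1 - 2 * m) ≤ s := by omega
      have h2 : (2 * j + (1 - 2 * m)) * (2 * j + (1 - 2 * m)) ≤ s * s := by nlinarith
      omega

lemma drainDays_min (m w : Int) (hm : m ≤ -1) (hw : 0 < w) :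
    0 ≤ drainDays m w ∧ 2 * w + 2 * drainDays m w * m - drainDays m w * (drainDays m w + 1) ≤ 0 ∧
      ∀ j, 0 ≤ j → j < drainDays m w → 0 < 2 * w + 2 * j * m - j * (j + 1) := by
  have hd3 : 3 ≤ 1 - 2 * m := by omega
  obtain ⟨h0, h1, h2⟩ := isqrt_spec ((1 - 2 * m) * (1 - 2 * m) + 8 * w) (by nlinarith)
  exact drain_min_aux m w (isqrt ((1 - 2 * m) * (1 - 2 * m) + 8 * w)) (drainDays m w)
    hm hw h0 h1 h2 rfl

lemma solveTail_min (l i0 w : Int) (hm : l - i0 ≤ -1) (hw : 0 < w) :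
    0 ≤ solveTail l i0 w - i0 ∧ G l i0 w (solveTail l i0 w - i0) ≤ 0 ∧
      ∀ j, 0 ≤ j → j < solveTail l i0 w - i0 → 0 < G l i0 w j := by
  obtain ⟨h0, h1, h2⟩ := drainDays_min (l - i0) w hm hw
  rw [solveTail, if_neg (by omega)]
  have hst : i0 + drainDays (l - i0) w - i0 = drainDays (l - i0) w := by ring
  rw [hst]
  refine ⟨h0, ?_, ?_⟩
  · unfold G; omega
  · intro j hj0 hjlt
    have := h2 j hj0 hjlt
    unfold G; omega

-- glue: loopA from an unclamped starting state equals solveTail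
lemma loopA_eq_solveTail (c l i0 : Int) (hl : l ≤ i0) (hm : l - i0 ≤ -1)
    (w : Int) (hwc : w ≤ c - i0) (hwl : w + l ≤ c) :
    loopA c l i0 w = solveTail l i0 w := by
  by_cases hw0 : 0 < w
  · obtain ⟨h0, h1, h2⟩ := solveTail_min l i0 w hm hw0
    have := loopA_char c l (c - i0).toNat i0 w (solveTail l i0 w - i0)
      (by omega) hwc hl hwl h0 h1 h2
    omega
  · rw [solveTail, if_pos (by omega)]
    have := loopA_char c l (c - i0).toNat i0 w 0 (by omega) hwc hl hwl (by omega)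
      (by simp [G]; omega) (by intro j h1 h2; omega)
    omega

-- clamped phase, case c ≤ l + 1: the loop counts straight down and returns c
lemma loopA_clamp_small (c l : Int) (_hl : 0 ≤ l) (hcl : c ≤ l + 1) :
    ∀ (n : ℕ) (i : Int), (c - i).toNat ≤ n → 0 ≤ i → i ≤ c →
    loopA c l i (c - i) = c := by
  intro n
  induction n with
  | zero =>
    intro i hn h0 hic
    have : i = c := by omega
    rw [loopA, if_neg (by omega)]
    omega
  | succ n ih =>
    intro i hn h0 hic
    by_cases hiw : 0 < c - i
    · rw [loopA, if_pos hiw]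
      have hcl2 : min (c - i + l) c = c := min_eq_right (by omega)
      rw [hcl2]
      exact ih (i + 1) (by omega) (by omega) (by omega)
    · have : i = c := by omega
      rw [loopA, if_neg hiw]
      omega

-- clamped phase, case c > l + 1: the loop walks to state (l+1, c-(l+1))
lemma loopA_clamp_big (c l : Int) (_hl : 0 ≤ l) (hcl : l + 1 < c) :
    ∀ (n : ℕ) (i : Int), (l + 1 - i).toNat ≤ n → 0 ≤ i → i ≤ l + 1 →
    loopA c l i (c - i) = loopA c l (l + 1) (c - (l + 1)) := by
  intro n
  induction n with
  | zero =>
    intro i hn h0 hil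
    have : i = l + 1 := by omega
    subst this; rfl
  | succ n ih =>
    intro i hn h0 hil
    by_cases hi : i = l + 1
    · subst hi; rfl
    · rw [loopA, if_pos (by omega)]
      have hcl2 : min (c - i + l) c = c := min_eq_right (by omega)
      rw [hcl2]
      exact ih (i + 1) (by omega) (by omega) (by omega)

-- ===== VERDICT (by name: the statement is the Claim_ definition above) =====
theorem days_until_empty_spec : Claim_equal_days_until_empty := by
  intro c l _
  unfold Spec_days_until_empty days_until_empty days_until_empty_alt
  by_cases hc : c ≤ 0
  · rw [loopA, if_neg (by omega), if_pos hc]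
  · rw [if_neg hc]
    rw [loopA, if_pos (show (0:Int) < c by omega)]
    have hz : (-1 : Int) + 1 = 0 := by norm_num
    rw [hz, sub_zero]
    by_cases hl : 0 ≤ l
    · rw [if_pos hl]
      have hmin : min (c + l) c = c := min_eq_right (by omega)
      rw [hmin]
      by_cases hcl : c ≤ l + 1
      · rw [if_pos hcl]
        have h := loopA_clamp_small c l hl hcl c.toNat 0 (by omega) (by omega) (by omega)
        rw [sub_zero] at h
        exact h
      · rw [if_neg hcl]
        have h1 := loopA_clamp_big c l hl (by omega) (l + 1).toNat 0 (by omega) (by omega) (by omega)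
        rw [sub_zero] at h1
        have h2 := loopA_eq_solveTail c l (l + 1) (by omega) (by omega)
          (c - (l + 1)) (by omega) (by omega)
        have hw : c - (l + 1) = c - l - 1 := by ring
        rw [hw] at h1 h2
        rw [h1]
        exact h2
    · rw [if_neg hl]
      have hmin : min (c + l) c = c + l := min_eq_left (by omega)
      rw [hmin]
      exact loopA_eq_solveTail c l 0 (by omega) (by omega) (c + l)
        (by omega) (by omega)
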